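-- pv_equiv track=rewrite | github.com/aakash2602/InterviewBit | Bit Manipulation/differentBitsSum.py | differentBitsSum
-- ===== SOURCE A (Python) =====
-- def differentBitsSum(A):
--     num = 0
--
--     n = len(A)
--     mod_num = pow(10, 9) + 7
--     for i in range(32):
--         count = 0
--         for j in range(n):
--             if A[j] & (1 << i):
--                 count += 1
--         num = (num + (count * (n - count) * 2)) % (mod_num)
--
--     return num
-- ===== SOURCE B (Python) =====
-- def differentBitsSum(A):
--     # Sum, over all ordered pairs, the number of differing low-32 bits of the pair's XOR.
--     total = 0
--     for x in A:
--         for y in A: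
--             v = (x ^ y) & 0xFFFFFFFF
--             for k in range(32):
--                 total += (v >> k) & 1
--     return total % (10 ** 9 + 7)
-- ===== Notes on version B (the rewrite author's own statement) =====
-- stated objective: alternative
-- what changed: Replaces A's per-bit-position counting (count set bits per position, add count*(n-count)*2) by a direct double loop over all ordered pairs that sums the popcount of the low 32 bits of each pair's XOR, reducing mod 10^9+7 once at the end.
import Mathlib
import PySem

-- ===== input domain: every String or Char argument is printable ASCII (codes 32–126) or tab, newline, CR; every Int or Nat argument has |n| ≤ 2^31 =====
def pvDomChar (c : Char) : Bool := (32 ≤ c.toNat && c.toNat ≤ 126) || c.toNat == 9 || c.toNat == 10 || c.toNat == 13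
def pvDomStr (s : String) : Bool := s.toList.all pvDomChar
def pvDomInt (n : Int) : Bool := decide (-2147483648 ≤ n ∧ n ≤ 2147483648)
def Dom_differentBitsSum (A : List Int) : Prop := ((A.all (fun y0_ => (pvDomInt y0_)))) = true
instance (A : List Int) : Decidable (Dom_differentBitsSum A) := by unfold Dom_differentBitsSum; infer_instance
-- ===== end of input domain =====

-- B replaces A's per-bit counting table by a direct double pass over ordered pairs,
-- summing the low-32 bits of each pair's XOR (objective: alternative algorithm, same result).

-- ===== PORT A =====
def differentBitsSum (A : List Int) : Int :=
  let n : Int := PySem.List.len A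
  let mod_num : Int := 10 ^ 9 + 7
  (PySem.List.pyRange 0 32).foldl (fun num i =>
    let count : Int := (PySem.List.pyRange 0 n).foldl (fun count j =>
      if PySem.Int.band (PySem.List.pyGetD A j 0) ((1 : Int) <<< i.toNat) ≠ 0 then count + 1
      else count) 0
    PySem.Int.mod (num + count * (n - count) * 2) mod_num) 0

-- ===== PORT B =====
def differentBitsSum_alt (A : List Int) : Int :=
  let total : Int := A.foldl (fun total x =>
    A.foldl (fun total y =>
      let v : Int := PySem.Int.band (PySem.Int.bxor x y) 0xFFFFFFFF
      (PySem.List.pyRange 0 32).foldl (fun total k =>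
        total + PySem.Int.band (v >>> k.toNat) 1) total) total) 0
  PySem.Int.mod total (10 ^ 9 + 7)

-- ===== PRECONDITION & SPEC =====
def Spec_differentBitsSum (A : List Int) (out : Int) : Prop := out = differentBitsSum_alt A
instance (A : List Int) (out : Int) : Decidable (Spec_differentBitsSum A out) := by unfold Spec_differentBitsSum; infer_instance

-- ===== CLAIM (what is proved, stated in full; the proofs are below) =====
def Claim_equal_differentBitsSum : Prop := ∀ (A : List Int), Dom_differentBitsSum A → Spec_differentBitsSum A (differentBitsSum A)

-- ===== LEMMAS AND PROOFS =====

-- Python's bit k of an arbitrary int (two's complement).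
def pbit (x : Int) (k : Nat) : Bool :=
  if 0 ≤ x then x.toNat.testBit k else !((-x - 1).toNat.testBit k)

-- A's bit test `A[j] & (1 << k) != 0` reads exactly Python's bit k.
lemma band_shift_ne_zero (x : Int) (k : Nat) :
    (PySem.Int.band x ((1 : Int) <<< k) ≠ 0) ↔ pbit x k = true := by
  have h2 : ((1 : Int) <<< k) = ((2 ^ k : Nat) : Int) := by
    rw [Int.shiftLeft_eq]; push_cast; ring
  rw [h2]
  simp only [PySem.Int.band, pbit]
  split_ifs with hx hb hb
  · rw [Int.toNat_natCast, Nat.and_two_pow]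
    cases h : x.toNat.testBit k
    · simp
    · simp
  · exact absurd (Int.natCast_nonneg _) hb
  · rw [Int.toNat_natCast, Nat.and_comm, Nat.and_two_pow]
    have hpow : 0 < 2 ^ k := Nat.two_pow_pos k
    cases h : (-x - 1).toNat.testBit k
    · simp
    · simp
  · exact absurd (Int.natCast_nonneg _) hb

-- XOR is bitwise on Python bits.
lemma pbit_bxor (x y : Int) (k : Nat) :
    pbit (PySem.Int.bxor x y) k = (pbit x k != pbit y k) := by
  simp only [PySem.Int.bxor, pbit]
  by_cases hx : 0 ≤ x <;> by_cases hy : 0 ≤ y <;>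
    simp only [hx, hy, if_true, if_false]
  · simp [Nat.testBit_xor]
  · have : ¬ (0 ≤ -(((x.toNat ^^^ (-y - 1).toNat : Nat) : Int)) - 1) := by omega
    simp only [this, if_false]
    have h : (-(-(((x.toNat ^^^ (-y - 1).toNat : Nat) : Int)) - 1) - 1) = ((x.toNat ^^^ (-y - 1).toNat : Nat) : Int) := by ring
    rw [h, Int.toNat_natCast, Nat.testBit_xor]
    cases x.toNat.testBit k <;> cases (-y - 1).toNat.testBit k <;> rfl
  · have : ¬ (0 ≤ -((((-x - 1).toNat ^^^ y.toNat : Nat) : Int)) - 1) := by omega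
    simp only [this, if_false]
    have h : (-(-((((-x - 1).toNat ^^^ y.toNat : Nat) : Int)) - 1) - 1) = (((-x - 1).toNat ^^^ y.toNat : Nat) : Int) := by ring
    rw [h, Int.toNat_natCast, Nat.testBit_xor]
    cases (-x - 1).toNat.testBit k <;> cases y.toNat.testBit k <;> rfl
  · simp only [Int.natCast_nonneg, if_true, Int.toNat_natCast, Nat.testBit_xor]
    cases (-x - 1).toNat.testBit k <;> cases (-y - 1).toNat.testBit k <;> rfl

-- The 32-bit mask produces a nonnegative value…
lemma band_mask_nonneg (v : Int) : 0 ≤ PySem.Int.band v 0xFFFFFFFF := by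
  simp only [PySem.Int.band]
  split_ifs <;> first | positivity | omega

-- …whose low 32 bits are Python's bits of v.
lemma band_mask_testBit (v : Int) (k : Nat) (hk : k < 32) :
    (PySem.Int.band v 0xFFFFFFFF).toNat.testBit k = pbit v k := by
  have hmask : ((0xFFFFFFFF : Int)).toNat = 2 ^ 32 - 1 := by decide
  simp only [PySem.Int.band, pbit]
  split_ifs with hv hb hb
  · rw [Int.toNat_natCast, hmask, Nat.and_two_pow_sub_one_eq_mod, Nat.testBit_mod_two_pow]
    simp [hk]
  · exact absurd (by norm_num) hb
  · rw [Int.toNat_natCast, hmask, Nat.and_comm, Nat.and_two_pow_sub_one_eq_mod]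
    have hlt : (-v - 1).toNat % 2 ^ 32 < 2 ^ 32 := Nat.mod_lt _ (by norm_num)
    have hsub : 2 ^ 32 - 1 - (-v - 1).toNat % 2 ^ 32 = 2 ^ 32 - ((-v - 1).toNat % 2 ^ 32 + 1) := by omega
    rw [hsub, Nat.testBit_two_pow_sub_succ hlt, Nat.testBit_mod_two_pow]
    simp [hk]
  · exact absurd (by norm_num) hb

-- Each term of B's innermost loop is the 0/1 value of one differing-bit test.
lemma term_eq (x y : Int) (k : Nat) (hk : k < 32) :
    PySem.Int.band ((PySem.Int.band (PySem.Int.bxor x y) 0xFFFFFFFF) >>> k) 1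
      = (if (pbit x k != pbit y k) = true then (1 : Int) else 0) := by
  obtain ⟨V, hV⟩ := Int.eq_ofNat_of_zero_le (band_mask_nonneg (PySem.Int.bxor x y))
  have hshift : ((V : Int) >>> k) = ((V >>> k : Nat) : Int) := by
    rw [Int.shiftRight_eq_div_pow, Nat.shiftRight_eq_div_pow]; exact_mod_cast rfl
  have hbit : V.testBit k = (pbit x k != pbit y k) := by
    have := band_mask_testBit (PySem.Int.bxor x y) k hk
    rw [hV, Int.toNat_natCast] at this
    rw [this, pbit_bxor]
  rw [hV, hshift]
  have h1 : PySem.Int.band ((V >>> k : Nat) : Int) 1 = (((V >>> k) &&& 1 : Nat) : Int) := by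
    exact_mod_cast PySem.Int.band_natCast (V >>> k) 1
  rw [h1]
  have h2 : (V >>> k) &&& 1 = (V.testBit k).toNat := by
    have := Nat.and_one_is_mod (V >>> k)
    rw [Nat.testBit, Nat.and_one_is_mod]
    rcases Nat.mod_two_eq_zero_or_one (V >>> k) with h | h <;> simp [h]
  rw [h2, hbit]
  cases (pbit x k != pbit y k) <;> rfl

-- Counting both sides of a boolean split over all ordered pairs of two lists.
lemma sum_pairs (p : Int → Bool) (L1 L2 : List Int) :
    (L1.map (fun x => (L2.map (fun y => if (p x != p y) = true then (1 : Int) else 0)).sum)).sum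
      = (L1.countP p : Int) * ((L2.length : Int) - (L2.countP p : Int))
        + ((L1.length : Int) - (L1.countP p : Int)) * (L2.countP p : Int) := by
  have hsplit : L2.length = L2.countP p + L2.countP (fun y => !p y) := by
    have := List.length_eq_countP_add_countP p (l := L2)
    simpa using this
  induction L1 with
  | nil => simp
  | cons x t ih =>
    have hinner : (L2.map (fun y => if (p x != p y) = true then (1 : Int) else 0)).sum
        = if p x then ((L2.length : Int) - (L2.countP p : Int)) else (L2.countP p : Int) := by
      rw [PySem.List.sum_map_ite_one_zero]
      cases hp : p x
      · rw [show (fun y => (false != p y)) = p from by funext z; simp,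
          if_neg (by decide : ¬ (false = true))]
      · rw [show (fun y => (true != p y)) = (fun y => !p y) from by funext z; simp,
          if_pos rfl]
        omega
    simp only [List.map_cons, List.sum_cons, ih, hinner, List.countP_cons, List.length_cons]
    cases hp : p x
    · simp
      ring
    · simp
      ring
  
-- A fold that reduces mod M at every step is the sum reduced once (M > 0).
lemma foldl_mod (M : Int) (hM : 0 < M) (g : Int → Int) (l : List Int) (a : Int) :
    l.foldl (fun num i => PySem.Int.mod (num + g i) M) (PySem.Int.mod a M)
      = PySem.Int.mod (a + (l.map g).sum) M := by
  induction l generalizing a with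
  | nil => simp
  | cons i t ih =>
    simp only [List.foldl_cons, List.map_cons, List.sum_cons]
    rw [PySem.Int.mod_eq_emod_of_pos hM, PySem.Int.mod_eq_emod_of_pos hM, Int.emod_add_emod,
      ← PySem.Int.mod_eq_emod_of_pos hM, ih]
    ring_nf

-- Exchanging two nested list sums.
lemma sum_swap {α β : Type} (l1 : List α) (l2 : List β) (f : α → β → Int) :
    (l1.map (fun a => (l2.map (f a)).sum)).sum
      = (l2.map (fun b => (l1.map (fun a => f a b)).sum)).sum := by
  induction l1 with
  | nil => simp
  | cons x t ih =>
    simp only [List.map_cons, List.sum_cons, ih]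
    rw [← PySem.List.sum_map_add_int]

-- A fold that reduces mod M at every step, started at 0, is the sum reduced once.
lemma foldl_mod_zero (M : Int) (hM : 0 < M) (g : Int → Int) (l : List Int) :
    l.foldl (fun num i => PySem.Int.mod (num + g i) M) 0
      = PySem.Int.mod ((l.map g).sum) M := by
  have h0 : PySem.Int.mod 0 M = 0 := by
    rw [PySem.Int.mod_eq_emod_of_pos hM]; simp
  have h := foldl_mod M hM g l 0
  rw [h0] at h
  simpa using h

-- A's inner loop counts the elements whose Python bit i.toNat is set.
lemma count_loop (A : List Int) (i : Int) :
    (PySem.List.pyRange 0 ((A.length : Int))).foldl (fun count j =>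
        if PySem.Int.band (PySem.List.pyGetD A j 0) ((1 : Int) <<< ((i.toNat : Int))) ≠ 0 then count + 1
        else count) 0
      = ((A.countP fun x => pbit x i.toNat : Nat) : Int) := by
  simp only [Int.shiftLeft_natCast_right]
  rw [show ((A.length : Int)) = PySem.List.len A from rfl,PySem.List.foldl_pyRange_pyGetD A 0
    (fun acc x => if PySem.Int.band x ((1 : Int) <<< i.toNat) ≠ 0 then acc + 1 else acc) 0 le_rfl]
  simp only [Int.toNat_zero, List.drop_zero]
  rw [PySem.List.foldl_ite_add_one (fun x => PySem.Int.band x ((1 : Int) <<< i.toNat) ≠ 0) A 0,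
    zero_add]
  congr 1
  apply List.countP_congr
  intro x _
  simpa using band_shift_ne_zero x i.toNat

-- B's innermost loop, summed.
lemma bits_loop (x y total : Int) :
    (PySem.List.pyRange 0 32).foldl (fun total k =>
        total + PySem.Int.band ((PySem.Int.band (PySem.Int.bxor x y) 0xFFFFFFFF) >>> ((k.toNat : Int))) 1) total
      = total + ((PySem.List.pyRange 0 32).map (fun k =>
          if (pbit x k.toNat != pbit y k.toNat) = true then (1 : Int) else 0)).sum := by
  simp only [Int.shiftRight_natCast_right]
  rw [PySem.List.foldl_add]
  congr 2
  apply List.map_congr_left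
  intro k hk
  have h := (PySem.List.mem_pyRange_one).mp hk
  exact term_eq x y k.toNat (by omega)

-- ===== VERDICT (by name: the statement is the Claim_ definition above) =====
theorem differentBitsSum_spec : Claim_equal_differentBitsSum := by
  intro A _
  unfold Spec_differentBitsSum
  have hA : differentBitsSum A
      = PySem.Int.mod (((PySem.List.pyRange 0 32).map (fun i =>
          ((A.countP fun x => pbit x i.toNat : Nat) : Int)
            * ((A.length : Int) - ((A.countP fun x => pbit x i.toNat : Nat) : Int)) * 2)).sum)
          (10 ^ 9 + 7) := by
    simp only [differentBitsSum, PySem.List.len, count_loop]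
    rw [foldl_mod_zero _ (by norm_num)]
  have hB : differentBitsSum_alt A
      = PySem.Int.mod ((A.map (fun x => (A.map (fun y =>
          ((PySem.List.pyRange 0 32).map (fun k =>
            if (pbit x k.toNat != pbit y k.toNat) = true then (1 : Int) else 0)).sum)).sum)).sum)
          (10 ^ 9 + 7) := by
    simp only [differentBitsSum_alt]
    congr 1
    rw [PySem.List.foldl_congr_mem A _ (fun total x => total + (A.map (fun y =>
        ((PySem.List.pyRange 0 32).map (fun k =>
          if (pbit x k.toNat != pbit y k.toNat) = true then (1 : Int) else 0)).sum)).sum) 0 ?_]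
    · rw [PySem.List.foldl_add, zero_add]
    · intro acc x _
      rw [PySem.List.foldl_congr_mem A _ (fun total y => total +
          ((PySem.List.pyRange 0 32).map (fun k =>
            if (pbit x k.toNat != pbit y k.toNat) = true then (1 : Int) else 0)).sum) acc ?_]
      · rw [PySem.List.foldl_add]
      · intro acc2 y _
        exact bits_loop x y acc2
  rw [hA, hB]
  congr 1
  have hswap1 : ∀ x : Int,
      (A.map (fun y => ((PySem.List.pyRange 0 32).map (fun k =>
          if (pbit x k.toNat != pbit y k.toNat) = true then (1 : Int) else 0)).sum)).sum
        = ((PySem.List.pyRange 0 32).map (fun k => (A.map (fun y =>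
            if (pbit x k.toNat != pbit y k.toNat) = true then (1 : Int) else 0)).sum)).sum := by
    intro x
    exact sum_swap A (PySem.List.pyRange 0 32) _
  rw [List.map_congr_left (fun x _ => hswap1 x),
    sum_swap A (PySem.List.pyRange 0 32) _]
  apply congrArg List.sum
  apply List.map_congr_left
  intro k _
  have hp := sum_pairs (fun z => pbit z k.toNat) A A
  simp only [] at hp
  rw [hp]
  ring
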